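-- pv_equiv track=rewrite | github.com/LazareLive/AutomatedDices | Automated Dice/Dice_Script.py | sequenceNumberPrismDice
-- ===== SOURCE A (Python) =====
-- import math
--
-- def isEven(n):
--     return ((n % 2) == 0)
--
-- def recursiveDiceNumberSequence(order):
--     #There are several "notable" sequences that we will use for the dice number sequence. They are called triad,
--     #tetrad and pentad. As order cannot be less than 3, we will only use these sequences to generate any dice.
--     #The goal will be to divide the number of faces until we can find a sequence. These sequences are generated by
--     #using various calculations on the classic dices.
--     #Tetrad case - Taken on the D3 and D6 dequences
--     if(order == 3):
--         return [3, 1, 2]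
--     #Tetrad case - Taken on the D8 sequence
--     elif(order == 4):
--         return [4, 1, 3, 2]
--     #Pentad case - Taken on the D10 sequence -- to be checked. This does not feel right
--     elif(order == 5):
--         return [5, 1, 4, 2, 3]
--     #For any other cases : use recursion until we find a n-ad sequence
--     newOrder = math.trunc(order / 2)
--     recursiveSequence = recursiveDiceNumberSequence(newOrder)
--     #As the recursiveSequence will send half of the information, creation of a new array
--     numberSequence = [0] * order
--     if(isEven(order)):
--         #On the case of an even order dice, check witch method to use based on the last recursion sequence
--         for i in range(newOrder):
--                 #Generate the even-numbers on one polar side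
--                 numberSequence[i] = recursiveSequence[i] * 2
--                 #Generate the odd_numbers on the other side
--                 if(isEven(newOrder)):
--                     #On the even-even case, the last sequence is repeated to generate the current order
--                     numberSequence[newOrder + i] = numberSequence[i] - 1
--                 else:
--                     #On the even-odd case, the last sequence must be inverted to have a weak-strong alternance
--                     numberSequence[newOrder + i] = ((newOrder - recursiveSequence[i] + 1) * 2) - 1
--     else:
--         #On the case of an odd dice order, generate the dice following these rules
--         #Placement of the first number
--         numberSequence[0] = order
--         #Placement of the recursive sequence
--         for i in range(newOrder):
--             #Generation of the even numbers on a polar side of the order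
--             numberSequence[i + 1] = recursiveSequence[newOrder - i - 1] * 2
--             #Generation of the odd numbers
--             numberSequence[order - (i + 1)] = order - numberSequence[i + 1]
--     #Return the number sequence at the end
--     return numberSequence
--
-- def diceNumberAlgorithmSequence(faces):
--     #First: check the number of asked faces. Cannot be less than 3.
--     if(faces < 3):
--         return [(i + 1) for i in range(faces)]
--     #If the number of faces is 4, a specific array must be returned as this cannot be created by the algorithm, and this is
--     #the only solution for a 4 sided die
--     if(faces == 4):
--         return [4, 2, 1, 3]
--     #In all other cases, we need to check whereas the die is even or odd
--     if(isEven(faces)):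
--         #If it is even, the generation will follow the standard dice number sequence generation as the opposite sides must be
--         #equal to the number of the die faces plus one.
--         #Calculation of the even number sequence
--         evenFaces = math.trunc(faces / 2)
--         numberSequenceOrder = recursiveDiceNumberSequence(evenFaces)
--         for i in range(evenFaces):
--             #For each even number generated (NSO multiplied by 2)
--             numberSequenceOrder[i] = numberSequenceOrder[i] * 2
--             #Creation of the opposite side of the die
--             numberSequenceOrder.append(faces - numberSequenceOrder[i] + 1)
--         return numberSequenceOrder
--     else:
--         #If it is odd, the generation is automatically created by the recursion
--         return recursiveDiceNumberSequence(faces)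
--     #In case of a problem, always send zero
--     return [0]
--
-- def sequenceNumberPrismDice(faces):
--     #Get the sequence based on the number of faces
--     sequenceOrder = diceNumberAlgorithmSequence(faces)
--     #If the number of faces is 10, replace 10 with 0
--     if (faces == 10):
--         tenPosition = sequenceOrder.index(10)
--         sequenceOrder[tenPosition] = 0
--     #If even, return the sequence order as is
--     if (isEven(faces)):
--         return sequenceOrder
--     #If odd, generation of a twin-numbered system
--     else:
--         oddSequence = [0] * (faces * 2)
--         for i in range(faces):
--             oddSequence[i * 2] = sequenceOrder[i]
--             oddSequencePosition = ((i * 2) - 1) % (2 * faces)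
--             oddSequence[oddSequencePosition] = sequenceOrder[i]
--         return oddSequence
--     #In case of problem, return something
--     return [0]
-- ===== SOURCE B (Python) =====
-- def _dice_seq(order):
--     # bottom-up: record the halving chain, then rebuild from the base sequence
--     chain = []
--     o = order
--     while o > 5:
--         chain.append(o)
--         o //= 2
--     if o == 3:
--         seq = [3, 1, 2]
--     elif o == 4:
--         seq = [4, 1, 3, 2]
--     else:
--         seq = [5, 1, 4, 2, 3]
--     for n in reversed(chain):
--         h = n // 2
--         if n % 2 == 0:
--             top = [x * 2 for x in seq]
--             if h % 2 == 0:
--                 bot = [x - 1 for x in top]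
--             else:
--                 bot = [(h - x + 1) * 2 - 1 for x in seq]
--             seq = top + bot
--         else:
--             seq = [n] + [2 * x for x in reversed(seq)] + [n - 2 * x for x in seq]
--     return seq
--
-- def sequenceNumberPrismDice(faces):
--     if faces == 4:
--         return [4, 2, 1, 3]
--     if faces < 3:
--         base = list(range(1, faces + 1))
--     elif faces % 2 == 0:
--         half = [2 * x for x in _dice_seq(faces // 2)]
--         base = half + [faces + 1 - x for x in half]
--     else:
--         base = _dice_seq(faces)
--     if faces == 10:
--         base[base.index(10)] = 0
--     if faces % 2 == 0:
--         return base
--     if not base: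
--         return []
--     return [base[0]] + [v for x in base[1:] for v in (x, x)] + [base[0]]
-- ===== Notes on version B (the rewrite author's own statement) =====
-- stated objective: alternative
-- what changed: Replaces the top-down recursion with an explicit bottom-up build: record the halving chain iteratively, start from the base sequence and rebuild each level with list comprehensions (map/append) instead of index-assignment loops into preallocated zero arrays; the odd twin doubling becomes a flattened pair list instead of modular index writes.
import Mathlib
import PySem

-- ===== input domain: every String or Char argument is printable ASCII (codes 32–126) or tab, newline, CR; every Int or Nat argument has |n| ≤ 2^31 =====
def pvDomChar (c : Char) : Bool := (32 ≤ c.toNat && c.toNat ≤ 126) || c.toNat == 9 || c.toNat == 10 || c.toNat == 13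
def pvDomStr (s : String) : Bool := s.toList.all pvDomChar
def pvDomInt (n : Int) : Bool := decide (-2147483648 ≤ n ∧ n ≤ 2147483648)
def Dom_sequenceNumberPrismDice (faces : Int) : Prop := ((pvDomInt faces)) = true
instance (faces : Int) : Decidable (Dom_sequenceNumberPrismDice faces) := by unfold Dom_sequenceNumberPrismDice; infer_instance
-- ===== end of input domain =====

-- B replaces A's top-down recursion by an iterative bottom-up rebuild along the recorded
-- halving chain, using map/append list construction instead of index assignments (alternative
-- decomposition, same asymptotic cost; return-value equivalence only — neither mutates input).

-- ===== PORT A =====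
def pvIsEven (n : Int) : Bool := PySem.Int.mod n 2 == 0

-- fuel only makes the recursion total; Python A only calls this with order ≥ 3, where fuel ≥ order suffices
def recA : Nat → Int → List Int
  | 0, _ => []
  | fuel+1, order =>
    if order = 3 then [3, 1, 2]
    else if order = 4 then [4, 1, 3, 2]
    else if order = 5 then [5, 1, 4, 2, 3]
    else
      let newOrder := PySem.Int.truncdiv order 2   -- math.trunc(order / 2), exact for |order| ≤ 2^31
      let rs := recA fuel newOrder
      let ns0 : List Int := List.replicate order.toNat 0
      if pvIsEven order then
        (List.range newOrder.toNat).foldl (fun ns (i : Nat) =>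
          let v := (PySem.List.pyGetD rs (i : Int) 0) * 2
          let ns := ns.set i v
          if pvIsEven newOrder then ns.set (newOrder.toNat + i) (v - 1)
          else ns.set (newOrder.toNat + i) ((newOrder - PySem.List.pyGetD rs (i : Int) 0 + 1) * 2 - 1)) ns0
      else
        (List.range newOrder.toNat).foldl (fun ns (i : Nat) =>
          let v := (PySem.List.pyGetD rs (newOrder - (i : Int) - 1) 0) * 2
          let ns := ns.set (i + 1) v
          ns.set (order.toNat - (i + 1)) (order - v)) (ns0.set 0 order)

def diceAlgA (faces : Int) : List Int :=
  if faces < 3 then (List.range faces.toNat).map (fun i : Nat => (i : Int) + 1)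
  else if faces = 4 then [4, 2, 1, 3]
  else if pvIsEven faces then
    let evenFaces := PySem.Int.truncdiv faces 2
    let ns := recA faces.natAbs evenFaces
    (List.range evenFaces.toNat).foldl (fun ns (i : Nat) =>
      let v := (PySem.List.pyGetD ns (i : Int) 0) * 2
      (ns.set i v) ++ [faces - v + 1]) ns
  else recA faces.natAbs faces

def sequenceNumberPrismDice (faces : Int) : List Int :=
  let seq0 := diceAlgA faces
  let sequenceOrder := if faces = 10 then seq0.set ((PySem.List.index? seq0 10).getD 0) 0 else seq0
  if pvIsEven faces then sequenceOrder
  else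
    (List.range faces.toNat).foldl (fun os (i : Nat) =>
      let os := os.set (i * 2) (PySem.List.pyGetD sequenceOrder (i : Int) 0)
      let pos := PySem.Int.mod ((i : Int) * 2 - 1) (2 * faces)
      os.set pos.toNat (PySem.List.pyGetD sequenceOrder (i : Int) 0))
      (List.replicate (faces * 2).toNat 0)

-- ===== PORT B =====
-- the while loop 'while o > 5: chain.append(o); o //= 2', with fuel only as a totality guard
def chainB : Nat → Int → List Int × Int
  | 0, o => ([], o)
  | fuel+1, o =>
    if 5 < o then
      let r := chainB fuel (PySem.Int.floordiv o 2)
      (o :: r.1, r.2)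
    else ([], o)

def baseB (o : Int) : List Int :=
  if o = 3 then [3, 1, 2] else if o = 4 then [4, 1, 3, 2] else [5, 1, 4, 2, 3]

def stepB (seq : List Int) (n : Int) : List Int :=
  let h := PySem.Int.floordiv n 2
  if PySem.Int.mod n 2 == 0 then
    let top := seq.map (· * 2)
    let bot := if PySem.Int.mod h 2 == 0 then top.map (· - 1)
               else seq.map (fun x => (h - x + 1) * 2 - 1)
    top ++ bot
  else
    ([n] ++ seq.reverse.map (· * 2)) ++ seq.map (fun x => n - 2 * x)

def diceSeqB (order : Int) : List Int :=
  let p := chainB order.natAbs order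
  p.1.reverse.foldl stepB (baseB p.2)

def sequenceNumberPrismDice_alt (faces : Int) : List Int :=
  if faces = 4 then [4, 2, 1, 3]
  else
    let base0 :=
      if faces < 3 then PySem.List.pyRange 1 (faces + 1) 1
      else if PySem.Int.mod faces 2 == 0 then
        let half := (diceSeqB (PySem.Int.floordiv faces 2)).map (2 * ·)
        half ++ half.map (fun x => faces + 1 - x)
      else diceSeqB faces
    let base := if faces = 10 then base0.set ((PySem.List.index? base0 10).getD 0) 0 else base0
    if PySem.Int.mod faces 2 == 0 then base
    else if base.isEmpty then []
    else [base.headD 0] ++ (base.drop 1).flatMap (fun x => [x, x]) ++ [base.headD 0]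

-- ===== PRECONDITION & SPEC =====
def Spec_sequenceNumberPrismDice (faces : Int) (out : List Int) : Prop := out = sequenceNumberPrismDice_alt faces
instance (faces : Int) (out : List Int) : Decidable (Spec_sequenceNumberPrismDice faces out) := by unfold Spec_sequenceNumberPrismDice; infer_instance

-- ===== CLAIM (what is proved, stated in full; the proofs are below) =====
def Claim_equal_sequenceNumberPrismDice : Prop := ∀ (faces : Int), Dom_sequenceNumberPrismDice faces → Spec_sequenceNumberPrismDice faces (sequenceNumberPrismDice faces)

-- ===== LEMMAS AND PROOFS =====


theorem pv_foldl_range_succ {α : Type} (f : α → Nat → α) (k : Nat) (a : α) :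
    (List.range (k+1)).foldl f a = f ((List.range k).foldl f a) k := by
  simp [List.range_succ]

theorem pv_fold_set2_length (p q : Nat → Nat) (a b : Nat → Int) (k : Nat) (ns : List Int) :
    ((List.range k).foldl (fun ns i => (ns.set (p i) (a i)).set (q i) (b i)) ns).length = ns.length := by
  induction k with
  | zero => simp
  | succ k ih => rw [pv_foldl_range_succ]; simp [ih]

theorem pv_evenFold_get (f g : Nat → Int) (h : Nat) (ns : List Int)
    (hlen : ns.length = h + h) (k : Nat) (hk : k ≤ h) (j : Nat) :
    ((List.range k).foldl (fun ns i => (ns.set i (f i)).set (h + i) (g i)) ns)[j]? =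
      if j < k then some (f j) else if h ≤ j ∧ j < h + k then some (g (j - h)) else ns[j]? := by
  induction k with
  | zero => split_ifs with h1 h2 <;> first | rfl | omega
  | succ k ih =>
    rw [pv_foldl_range_succ]
    have hL := pv_fold_set2_length (fun i => i) (fun i => h + i) f g k ns
    rw [List.getElem?_set, List.getElem?_set, List.length_set, hL, hlen, ih (by omega)]
    split_ifs <;> first | rfl | omega | (exfalso; omega) | (congr 1; omega) | (congr 2; omega) | simp_all

theorem pv_oddFold_get (e q : Nat → Int) (h : Nat) (ns : List Int)
    (hlen : ns.length = h + h + 1) (k : Nat) (hk : k ≤ h) (j : Nat) :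
    ((List.range k).foldl (fun ns i => (ns.set (i + 1) (e i)).set (h + h - i) (q i)) ns)[j]? =
      if 1 ≤ j ∧ j < k + 1 then some (e (j - 1))
      else if h + h - k + 1 ≤ j ∧ j ≤ h + h then some (q (h + h - j)) else ns[j]? := by
  induction k with
  | zero => split_ifs with h1 h2 <;> first | rfl | omega
  | succ k ih =>
    rw [pv_foldl_range_succ]
    have hL := pv_fold_set2_length (fun i => i + 1) (fun i => h + h - i) e q k ns
    rw [List.getElem?_set, List.getElem?_set, List.length_set, hL, hlen, ih (by omega)]
    split_ifs <;> first | rfl | omega | (exfalso; omega) | (congr 1; omega) | (congr 2; omega) | simp_all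



theorem pv_twinFold_get (b : Nat → Int) (F : Nat) (ns : List Int)
    (hlen : ns.length = F + F) (pos : Nat → Nat)
    (hpos0 : pos 0 = F + F - 1) (hposS : ∀ i, 1 ≤ i → i < F → pos i = i + i - 1)
    (k : Nat) (hk : k ≤ F) (j : Nat) :
    ((List.range k).foldl (fun os i => (os.set (i * 2) (b i)).set (pos i) (b i)) ns)[j]? =
      if k = 0 then ns[j]?
      else if j = 0 then some (b 0)
      else if j = F + F - 1 then some (b 0)
      else if 1 ≤ j ∧ j + 2 ≤ k + k then some (b ((j + 1) / 2))
      else ns[j]? := by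
  induction k with
  | zero => simp
  | succ k ih =>
    rw [pv_foldl_range_succ]
    have hL := pv_fold_set2_length (fun i => i * 2) pos b b k ns
    rw [List.getElem?_set, List.getElem?_set, List.length_set, hL, hlen, ih (by omega)]
    rcases Nat.eq_zero_or_pos k with hk0 | hk1
    · subst hk0
      rw [hpos0]
      split_ifs <;> first | rfl | omega | (exfalso; omega) | (congr 2; omega) | simp_all
    · rw [hposS k hk1 (by omega)]
      split_ifs <;> first | rfl | omega | (exfalso; omega) | (congr 2; omega) | simp_all

theorem pv_flatMap_pair_get (l : List Int) (m : Nat) :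
    (l.flatMap (fun x => [x, x]))[m]? = l[m / 2]? := by
  induction l generalizing m with
  | nil => simp
  | cons a t ih =>
    match m with
    | 0 => simp
    | 1 => simp
    | Nat.succ (Nat.succ m) =>
      have h2 : (m + 2) / 2 = m / 2 + 1 := by omega
      simp [List.flatMap_cons, h2, ih]

theorem pv_wrapFold (c : Int) (rs : List Int) (k : Nat) (hk : k ≤ rs.length) :
    (List.range k).foldl (fun ns (i : Nat) =>
        let v := (PySem.List.pyGetD ns (i : Int) 0) * 2
        (ns.set i v) ++ [c - v + 1]) rs
      = ((rs.take k).map (· * 2)) ++ rs.drop k ++ ((rs.take k).map (fun x => c - 2 * x + 1)) := by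
  induction k with
  | zero => simp
  | succ k ih =>
    rw [pv_foldl_range_succ, ih (by omega)]
    have hkl : k < rs.length := by omega
    have htk : (rs.take k).length = k := by simp; omega
    have hdrop : rs.drop k = rs[k] :: rs.drop (k + 1) := List.drop_eq_getElem_cons hkl
    rw [hdrop]
    have hget : ∀ (A B t : List Int) (x : Int), A.length = k →
        PySem.List.pyGetD (A ++ (x :: t) ++ B) (k : Int) 0 = x := by
      intro A B t x hA
      rw [PySem.List.pyGetD_natCast, List.getD_eq_getElem?_getD, List.append_assoc,
          List.getElem?_append_right (by omega), hA, Nat.sub_self]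
      simp
    have hset : ∀ (A B t : List Int) (x w : Int), A.length = k →
        (A ++ (x :: t) ++ B).set k w = A ++ (w :: t) ++ B := by
      intro A B t x w hA
      rw [List.append_assoc, List.set_append, if_neg (by omega), hA, Nat.sub_self,
          List.set_append, if_pos (by simp), List.set_cons_zero, List.append_assoc]
    beta_reduce
    have hA : ((rs.take k).map (· * 2)).length = k := by simpa using htk
    simp only [hget _ _ _ _ hA, hset _ _ _ _ _ hA]
    have htk1 : rs.take (k + 1) = rs.take k ++ [rs[k]] := by
      rw [List.take_add_one, List.getElem?_eq_getElem hkl]; rfl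
    rw [htk1]
    simp only [List.map_append, List.map_cons, List.map_nil]
    have hc : c - 2 * rs[k] + 1 = c - rs[k] * 2 + 1 := by ring
    rw [hc]
    simp [List.append_assoc]

theorem pv_chainB_le (f : Nat) (o : Int) (h : ¬ 5 < o) : chainB f o = ([], o) := by
  cases f <;> simp [chainB, h]

theorem pv_chain_congr (N : Nat) : ∀ (o : Int), o.toNat ≤ N → ∀ f1 f2 : Nat,
    o.toNat ≤ f1 → o.toNat ≤ f2 → chainB f1 o = chainB f2 o := by
  induction N with
  | zero =>
    intro o hN f1 f2 h1 h2
    have h5 : ¬ 5 < o := by omega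
    rw [pv_chainB_le f1 o h5, pv_chainB_le f2 o h5]
  | succ N ih =>
    intro o hN f1 f2 h1 h2
    by_cases h5 : 5 < o
    · obtain ⟨m1, rfl⟩ : ∃ m, f1 = m + 1 := ⟨f1 - 1, by omega⟩
      obtain ⟨m2, rfl⟩ : ∃ m, f2 = m + 1 := ⟨f2 - 1, by omega⟩
      have hfd : PySem.Int.floordiv o 2 = o / 2 := PySem.Int.floordiv_eq_ediv_of_pos (by omega)
      simp only [chainB, if_pos h5]
      rw [ih (PySem.Int.floordiv o 2) (by rw [hfd]; omega) m1 ((o / 2).toNat) (by rw [hfd]; omega) (by rw [hfd]),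
          ih (PySem.Int.floordiv o 2) (by rw [hfd]; omega) m2 ((o / 2).toNat) (by rw [hfd]; omega) (by rw [hfd])]
    · rw [pv_chainB_le f1 o h5, pv_chainB_le f2 o h5]

theorem pv_diceSeqB_step (o : Int) (h6 : 6 ≤ o) :
    diceSeqB o = stepB (diceSeqB (PySem.Int.floordiv o 2)) o := by
  have hfd : PySem.Int.floordiv o 2 = o / 2 := PySem.Int.floordiv_eq_ediv_of_pos (by omega)
  obtain ⟨m, hm⟩ : ∃ m, o.natAbs = m + 1 := ⟨o.natAbs - 1, by omega⟩
  unfold diceSeqB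
  rw [hm]
  simp only [chainB, if_pos (by omega : (5:Int) < o)]
  rw [pv_chain_congr ((PySem.Int.floordiv o 2).toNat) (PySem.Int.floordiv o 2) le_rfl m
      ((PySem.Int.floordiv o 2).natAbs) (by rw [hfd]; omega) (by rw [hfd]; omega)]
  simp [List.foldl_append]


theorem pv_main (N : Nat) : ∀ (order : Int), 3 ≤ order → order.toNat ≤ N →
    ∀ fuel : Nat, order.toNat ≤ fuel →
    recA fuel order = diceSeqB order ∧ (recA fuel order).length = order.toNat := by
  induction N with
  | zero => intro order h3 hN; omega
  | succ N ih =>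
    intro order h3 hN fuel hfuel
    obtain ⟨m, rfl⟩ : ∃ m, fuel = m + 1 := ⟨fuel - 1, by omega⟩
    by_cases e3 : order = 3
    · subst e3
      refine ⟨?_, ?_⟩ <;> simp [recA, show diceSeqB 3 = [3,1,2] from by decide]
    by_cases e4 : order = 4
    · subst e4
      refine ⟨?_, ?_⟩ <;> simp [recA, show diceSeqB 4 = [4,1,3,2] from by decide]
    by_cases e5 : order = 5
    · subst e5
      refine ⟨?_, ?_⟩ <;> simp [recA, show diceSeqB 5 = [5,1,4,2,3] from by decide]
    have h6 : 6 ≤ order := by omega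
    have hnd : PySem.Int.truncdiv order 2 = order / 2 := by
      simp [PySem.Int.truncdiv, Int.tdiv_eq_ediv, (by omega : (0:Int) ≤ order)]
    have hfd : PySem.Int.floordiv order 2 = order / 2 :=
      PySem.Int.floordiv_eq_ediv_of_pos (by omega)
    have h3' : 3 ≤ order / 2 := by omega
    obtain ⟨hrs, hslen⟩ := ih (order / 2) h3' (by omega) m (by omega)
    set s : List Int := diceSeqB (order / 2) with hs
    set H : Nat := (order / 2).toNat with hH
    have hslen' : s.length = H := by rw [← hrs]; exact hslen
    have hHc : ((H : Int)) = order / 2 := by omega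
    have hstep : diceSeqB order = stepB s order := by
      rw [pv_diceSeqB_step order h6, hfd]
    have hmod : PySem.Int.mod order 2 = order % 2 := PySem.Int.mod_eq_emod_of_pos (by omega)
    have hgetS : ∀ (j : Nat) (hj : j < s.length), PySem.List.pyGetD s (j : Int) 0 = s[j] := by
      intro j hj
      rw [PySem.List.pyGetD_natCast, List.getD_eq_getElem?_getD, List.getElem?_eq_getElem hj]
      rfl
    -- unfold one step of recA
    have hrec : recA (m + 1) order =
        (if pvIsEven order then
          (List.range H).foldl (fun ns (i : Nat) =>
            let v := (PySem.List.pyGetD s (i : Int) 0) * 2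
            let ns := ns.set i v
            if pvIsEven (order / 2) then ns.set (H + i) (v - 1)
            else ns.set (H + i) ((order / 2 - PySem.List.pyGetD s (i : Int) 0 + 1) * 2 - 1))
            (List.replicate order.toNat 0)
        else
          (List.range H).foldl (fun ns (i : Nat) =>
            let v := (PySem.List.pyGetD s (order / 2 - (i : Int) - 1) 0) * 2
            let ns := ns.set (i + 1) v
            ns.set (order.toNat - (i + 1)) (order - v))
            ((List.replicate order.toNat 0).set 0 order)) := by
      simp only [recA, if_neg e3, if_neg e4, if_neg e5, hnd, hrs, ← hs, ← hH]
    by_cases hev : pvIsEven order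
    · -- even order: order.toNat = H + H
      have hpar : order % 2 = 0 := by
        have := hev; unfold pvIsEven at this; rw [hmod] at this; simpa using this
      have hHH : order.toNat = H + H := by omega
      have hmodB : (PySem.Int.mod order 2 == 0) = true := by simp [hmod, hpar]
      have key : ∀ (g : Nat → Int) (bot : List Int), bot.length = H →
          (∀ (j : Nat) (hj : j < bot.length), bot[j] = g j) →
          ((List.range H).foldl (fun ns (i : Nat) =>
              (ns.set i ((PySem.List.pyGetD s (i : Int) 0) * 2)).set (H + i) (g i))
              (List.replicate order.toNat 0))
            = s.map (· * 2) ++ bot := by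
        intro g bot hbl hb
        apply List.ext_getElem?
        intro j
        rw [pv_evenFold_get (fun i => (PySem.List.pyGetD s (i : Int) 0) * 2) g H
            (List.replicate order.toNat 0) (by simp [hHH]) H le_rfl j]
        rw [List.getElem?_append]
        simp only [List.length_map, hslen']
        by_cases hj1 : j < H
        · rw [if_pos hj1, if_pos hj1, List.getElem?_map,
              List.getElem?_eq_getElem (show j < s.length by rw [hslen']; exact hj1),
              hgetS j (show j < s.length by rw [hslen']; exact hj1)]
          rfl
        · rw [if_neg hj1, if_neg hj1]
          by_cases hj2 : j < H + H
          · have hjb : j - H < bot.length := by rw [hbl]; omega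
            rw [if_pos ⟨by omega, by omega⟩, List.getElem?_eq_getElem hjb, hb (j - H) hjb]
          · rw [if_neg (by omega), List.getElem?_replicate, if_neg (by omega),
                List.getElem?_eq_none (by omega)]
      rw [hrec, if_pos hev, hstep]
      unfold stepB
      rw [hfd]
      simp only [hmodB, if_pos rfl, cond_true, if_true]
      constructor
      · by_cases hpe : pvIsEven (order / 2)
        · have hmodH : (PySem.Int.mod (order / 2) 2 == 0) = true := by
            unfold pvIsEven at hpe; simpa using hpe
          simp only [if_pos hpe, hmodH, if_true]
          exact key (fun i => (PySem.List.pyGetD s (i : Int) 0) * 2 - 1) ((s.map (· * 2)).map (· - 1))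
            (by simp [hslen']) (by
              intro j hj
              simp only [List.length_map] at hj
              simp only [List.getElem_map, hgetS j hj])
        · have hmodH : (PySem.Int.mod (order / 2) 2 == 0) = false := by
            unfold pvIsEven at hpe; simpa using hpe
          simp only [if_neg hpe, hmodH, Bool.false_eq_true, if_false]
          exact key (fun i => (order / 2 - PySem.List.pyGetD s (i : Int) 0 + 1) * 2 - 1)
            (s.map (fun x => (order / 2 - x + 1) * 2 - 1))
            (by simp [hslen']) (by
              intro j hj
              simp only [List.length_map] at hj
              simp only [List.getElem_map, hgetS j hj])
      · -- length
        split_ifs <;>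
          simp [pv_fold_set2_length (fun i => i) (fun i => H + i), hHH]
    · -- odd order
      have hpar : order % 2 = 1 := by
        have := hev; unfold pvIsEven at this; rw [hmod] at this; simp at this; omega
      have hHH : order.toNat = H + H + 1 := by omega
      have hmodB : (PySem.Int.mod order 2 == 0) = false := by simp [hmod, hpar]
      have hidx : ∀ (i : Nat), i < H → PySem.List.pyGetD s (order / 2 - (i : Int) - 1) 0
          = s[H - 1 - i]'(by rw [hslen']; omega) := by
        intro i hi
        have hc : (order / 2 - (i : Int) - 1) = ((H - 1 - i : Nat) : Int) := by omega
        rw [hc, PySem.List.pyGetD_natCast, List.getD_eq_getElem?_getD,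
            List.getElem?_eq_getElem (by rw [hslen']; omega)]
        rfl
      have hsub : ∀ i : Nat, order.toNat - (i + 1) = H + H - i := by intro i; omega
      rw [hrec, if_neg hev, hstep]
      unfold stepB
      rw [hfd]
      simp only [hmodB, Bool.false_eq_true, if_false]
      simp only [hsub]
      constructor
      · apply List.ext_getElem?
        intro j
        rw [pv_oddFold_get (fun i => (PySem.List.pyGetD s (order / 2 - (i : Int) - 1) 0) * 2)
            (fun i => order - (PySem.List.pyGetD s (order / 2 - (i : Int) - 1) 0) * 2) H
            ((List.replicate order.toNat 0).set 0 order) (by simp [hHH]) H le_rfl j]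
        by_cases hj0 : j = 0
        · subst hj0
          rw [if_neg (by omega), if_neg (by omega), List.getElem?_set,
              if_pos rfl, if_pos (by simp only [List.length_set, List.length_replicate]; omega), List.getElem?_append,
              if_pos (by simp), List.getElem?_append, if_pos (by simp)]
          rfl
        by_cases hj1 : 1 ≤ j ∧ j < H + 1
        · rw [if_pos hj1, List.getElem?_append, if_pos (by simp [hslen']; omega),
              List.getElem?_append, if_neg (by simp; omega)]
          simp only [List.length_singleton, List.getElem?_map,
            List.getElem?_reverse (by rw [hslen']; omega : j - 1 < s.length),
            List.getElem?_eq_getElem (by rw [hslen']; omega : s.length - 1 - (j - 1) < s.length)]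
          rw [hidx (j - 1) (by omega)]
          simp only [Option.map_some, Option.some.injEq, hslen']
        by_cases hj2 : H + H - H + 1 ≤ j ∧ j ≤ H + H
        · rw [if_neg hj1, if_pos hj2, List.getElem?_append, if_neg (by simp [hslen']; omega)]
          simp only [List.length_append, List.length_singleton, List.length_map,
            List.length_reverse, hslen', List.getElem?_map,
            List.getElem?_eq_getElem (by rw [hslen']; omega : j - (1 + H) < s.length)]
          rw [hidx (H + H - j) (by omega)]
          simp only [Option.map_some, Option.some.injEq]
          simp only [show H - 1 - (H + H - j) = j - (1 + H) from by omega]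
          ring
        · rw [if_neg hj1, if_neg hj2, List.getElem?_set, if_neg (by omega),
              List.getElem?_replicate, if_neg (by omega),
              List.getElem?_eq_none (by simp [hslen']; omega)]
      · rw [pv_fold_set2_length (fun i => i + 1) (fun i => H + H - i)
            (fun i => (PySem.List.pyGetD s (order / 2 - (i : Int) - 1) 0) * 2)
            (fun i => order - (PySem.List.pyGetD s (order / 2 - (i : Int) - 1) 0) * 2)]
        simp

theorem pv_flat_len (l : List Int) : (l.flatMap fun x => [x, x]).length = l.length + l.length := by
  induction l with
  | nil => rfl
  | cons a t ih => simp [ih]; omega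

-- ===== VERDICT (by name: the statement is the Claim_ definition above) =====
theorem sequenceNumberPrismDice_spec : Claim_equal_sequenceNumberPrismDice := by
  intro faces _hdom
  unfold Spec_sequenceNumberPrismDice
  by_cases h4 : faces = 4
  · subst h4; decide
  by_cases h10 : faces = 10
  · subst h10; decide
  by_cases hlt : faces < 3
  · -- small faces
    have hbase : PySem.List.pyRange 1 (faces + 1) 1 = (List.range faces.toNat).map (fun i : Nat => (i : Int) + 1) := by
      rw [PySem.List.pyRange_one]
      have : (faces + 1 - 1).toNat = faces.toNat := by omega
      rw [this]
      exact List.map_congr_left (fun x _ => by ring)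
    by_cases hev : pvIsEven faces
    · have hmodB : (PySem.Int.mod faces 2 == 0) = true := by unfold pvIsEven at hev; simpa using hev
      simp only [sequenceNumberPrismDice, sequenceNumberPrismDice_alt, diceAlgA,
        if_neg h4, if_neg h10, if_pos hlt, if_pos hev, hmodB, if_true, hbase]
    · have hmodB : (PySem.Int.mod faces 2 == 0) = false := by unfold pvIsEven at hev; simpa using hev
      by_cases h1 : faces = 1
      · subst h1; decide
      have hneg : faces ≤ -1 := by
        have : PySem.Int.mod faces 2 ≠ 0 := by simpa using hmodB
        rw [PySem.Int.mod_eq_emod_of_pos (by omega)] at this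
        omega
      have ht0 : faces.toNat = 0 := by omega
      have ht2 : (faces * 2).toNat = 0 := by omega
      have hnil : PySem.List.pyRange 1 (faces + 1) 1 = [] := PySem.List.pyRange_one_eq_nil (by omega)
      simp only [sequenceNumberPrismDice, sequenceNumberPrismDice_alt, diceAlgA,
        if_neg h4, if_neg h10, if_pos hlt, if_neg hev, hmodB, Bool.false_eq_true, if_false,
        hnil, ht0, ht2, List.range_zero, List.foldl_nil, List.replicate_zero, List.isEmpty_nil,
        if_true]
  · have h3 : 3 ≤ faces := by omega
    by_cases hev : pvIsEven faces
    · -- even faces ≥ 6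
      have hmodB : (PySem.Int.mod faces 2 == 0) = true := by unfold pvIsEven at hev; simpa using hev
      have hpar : faces % 2 = 0 := by
        have : PySem.Int.mod faces 2 = 0 := by simpa using hmodB
        rwa [PySem.Int.mod_eq_emod_of_pos (by omega)] at this
      have h6 : 6 ≤ faces := by omega
      have hnd : PySem.Int.truncdiv faces 2 = faces / 2 := by
        simp [PySem.Int.truncdiv, Int.tdiv_eq_ediv, (by omega : (0:Int) ≤ faces)]
      have hfd : PySem.Int.floordiv faces 2 = faces / 2 :=
        PySem.Int.floordiv_eq_ediv_of_pos (by omega)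
      obtain ⟨hrs, hslen⟩ := pv_main (faces / 2).toNat (faces / 2) (by omega) le_rfl
        faces.natAbs (by omega)
      obtain ⟨s, hs⟩ : ∃ s, diceSeqB (faces / 2) = s := ⟨_, rfl⟩
      rw [hs] at hrs
      have hslen2 : s.length = (faces / 2).toNat := by rw [← hrs]; exact hslen
      simp only [sequenceNumberPrismDice, sequenceNumberPrismDice_alt, diceAlgA,
        if_neg h4, if_neg h10, if_neg hlt, if_pos hev, hmodB, if_true, hnd, hfd, hrs, hs]
      rw [pv_wrapFold faces s (faces / 2).toNat (le_of_eq hslen2.symm)]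
      rw [show (faces / 2).toNat = s.length from hslen2.symm, List.take_length, List.drop_length]
      simp only [List.append_nil, List.map_map]
      apply congrArg₂
      · exact List.map_congr_left (fun x _ => by ring)
      · exact List.map_congr_left (fun x _ => by simp; ring)
    · -- odd faces ≥ 3
      have hmodB : (PySem.Int.mod faces 2 == 0) = false := by unfold pvIsEven at hev; simpa using hev
      have hpar : faces % 2 = 1 := by
        have : PySem.Int.mod faces 2 ≠ 0 := by simpa using hmodB
        rw [PySem.Int.mod_eq_emod_of_pos (by omega)] at this
        omega
      obtain ⟨hrs, hslen⟩ := pv_main faces.toNat faces h3 le_rfl faces.natAbs (by omega)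
      obtain ⟨s, hs⟩ : ∃ s, diceSeqB faces = s := ⟨_, rfl⟩
      obtain ⟨F, hF⟩ : ∃ F, faces.toNat = F := ⟨_, rfl⟩
      rw [hs] at hrs
      rw [hF] at hslen
      have hslen' : s.length = F := by rw [← hrs]; exact hslen
      have hFc : ((F : Int)) = faces := by omega
      have hsne : s ≠ [] := by intro h; rw [h] at hslen'; simp at hslen'; omega
      have hEmp : s.isEmpty = false := by simpa using hsne
      simp only [sequenceNumberPrismDice, sequenceNumberPrismDice_alt, diceAlgA,
        if_neg h4, if_neg h10, if_neg hlt, if_neg hev, hmodB, Bool.false_eq_true, if_false,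
        hrs, hs, hEmp, hF]
      have hrep : (List.replicate (faces * 2).toNat (0:Int)).length = F + F := by simp; omega
      have hpos0 : (PySem.Int.mod ((0:Nat) * 2 - 1) (2 * faces)).toNat = F + F - 1 := by
        rw [PySem.Int.mod_eq_emod_of_pos (by omega)]
        have : ((0:Nat) * 2 - 1 : Int) = (2 * faces - 1) + (2 * faces) * (-1) := by push_cast; ring
        rw [this, Int.add_mul_emod_self_left, Int.emod_eq_of_lt (by omega) (by omega)]
        omega
      have hposS : ∀ i : Nat, 1 ≤ i → i < F → (PySem.Int.mod ((i:Nat) * 2 - 1) (2 * faces)).toNat = i + i - 1 := by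
        intro i h1 h2
        rw [PySem.Int.mod_eq_emod_of_pos (by omega)]
        have hic : ((i:Int)) < faces := by omega
        rw [Int.emod_eq_of_lt (by push_cast; omega) (by push_cast; omega)]
        omega
      apply List.ext_getElem?
      intro j
      rw [pv_twinFold_get (fun i => PySem.List.pyGetD s (i : Int) 0) F
          (List.replicate (faces * 2).toNat 0) hrep
          (fun i => (PySem.Int.mod ((i:Nat) * 2 - 1) (2 * faces)).toNat) hpos0 hposS
          F le_rfl j]
      have hgetS : ∀ (i : Nat) (hi : i < s.length), PySem.List.pyGetD s (i : Int) 0 = s[i] := by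
        intro i hi
        rw [PySem.List.pyGetD_natCast, List.getD_eq_getElem?_getD, List.getElem?_eq_getElem hi]
        rfl
      have hF0 : ¬ (F = 0) := by omega
      have hhead : s.head?.getD 0 = s[0]'(by rw [hslen']; omega) := by
        rcases s with _ | ⟨a, t⟩
        · simp at hsne
        · rfl
      rw [if_neg hF0]
      by_cases hj0 : j = 0
      · subst hj0
        rw [if_pos rfl, hgetS 0 (by rw [hslen']; omega), List.getElem?_append, if_pos (by simp),
            List.getElem?_append, if_pos (by simp)]
        simp [hhead]
      by_cases hjL : j = F + F - 1
      · rw [if_neg hj0, if_pos hjL, hgetS 0 (by rw [hslen']; omega)]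
        have hlenmid : (1 + ((s.drop 1).flatMap fun x => [x, x]).length) = F + F - 1 := by
          rw [pv_flat_len]; simp [hslen']; omega
        rw [List.getElem?_append, if_neg (by simp [pv_flat_len, hslen']; omega)]
        simp only [List.length_append, List.length_singleton, pv_flat_len, List.length_drop, hslen']
        rw [show j - (1 + ((F - 1) + (F - 1))) = 0 from by omega]
        simp [hhead]
      by_cases hjm : 1 ≤ j ∧ j + 2 ≤ F + F
      · rw [if_neg hj0, if_neg hjL, if_pos hjm]
        rw [List.getElem?_append, if_pos (by simp [pv_flat_len, hslen']; omega),
            List.getElem?_append, if_neg (by simp; omega)]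
        simp only [List.length_singleton]
        rw [pv_flatMap_pair_get, List.getElem?_drop]
        rw [show 1 + (j - 1) / 2 = (j + 1) / 2 from by omega]
        rw [hgetS ((j + 1) / 2) (by rw [hslen']; omega),
            List.getElem?_eq_getElem (by rw [hslen']; omega)]
      · rw [if_neg hj0, if_neg hjL, if_neg hjm, List.getElem?_replicate,
            if_neg (by omega), List.getElem?_eq_none]
        simp [pv_flat_len, hslen']
        omega
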